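-- pv_equiv track=rewrite | github.com/danesolberg/algorithms | search/quickselect.py | pivot_median_of_medians
-- ===== SOURCE A (Python) =====
-- def pivot_median_of_medians(a, start, end):
--     chunks = []
--     chunk_len = 50
--
--     if (end - start + 1 < chunk_len):
--         return end
--
--     chunks = [a[i: min(end+1, i + chunk_len)] for i in range(start, end+1, chunk_len)]
--
--     for chunk in chunks:
--         chunk.sort()
--
--     chunks.sort(key= lambda c: c[len(c)//2])
--
--     middle_chunk = chunks[len(chunks)//2]
--
--     pivot_val = middle_chunk[len(middle_chunk)//2]
--
--     for i in range(start, end+1):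
--         if a[i] == pivot_val:
--             return i
-- ===== SOURCE B (Python) =====
-- # B: selection instead of sorting -- each chunk's median and the median of the chunk
-- # medians are found by a quickselect-style nth_smallest (no chunk sorts, no key-sort of
-- # the chunk list), and the final scan is list.index with start/stop bounds.
--
-- def nth_smallest(xs, k):
--     # k-th smallest (0-based) element of non-empty xs, for 0 <= k < len(xs)
--     p = xs[0]
--     lt = [x for x in xs if x < p]
--     if k < len(lt):
--         return nth_smallest(lt, k)
--     eq = xs.count(p)
--     if k < len(lt) + eq:
--         return p
--     return nth_smallest([x for x in xs if x > p], k - len(lt) - eq)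
--
--
-- def chunk_median(a, i, hi):
--     c = a[i:hi]
--     return nth_smallest(c, len(c) // 2)
--
--
-- def pivot_median_of_medians(a, start, end):
--     if end - start + 1 < 50:
--         return end
--     medians = [chunk_median(a, i, min(end + 1, i + 50)) for i in range(start, end + 1, 50)]
--     pivot_val = nth_smallest(medians, len(medians) // 2)
--     return a.index(pivot_val, start, end + 1)
-- ===== Notes on version B (the rewrite author's own statement) =====
-- stated objective: alternative
-- what changed: B replaces A's three sorts (sorting every chunk, then sorting the chunk list by middle element) with a quickselect-style nth_smallest used twice (chunk median, then median of the medians), and replaces the final linear scan with list.index(pivot, start, end+1).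
import Mathlib
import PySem

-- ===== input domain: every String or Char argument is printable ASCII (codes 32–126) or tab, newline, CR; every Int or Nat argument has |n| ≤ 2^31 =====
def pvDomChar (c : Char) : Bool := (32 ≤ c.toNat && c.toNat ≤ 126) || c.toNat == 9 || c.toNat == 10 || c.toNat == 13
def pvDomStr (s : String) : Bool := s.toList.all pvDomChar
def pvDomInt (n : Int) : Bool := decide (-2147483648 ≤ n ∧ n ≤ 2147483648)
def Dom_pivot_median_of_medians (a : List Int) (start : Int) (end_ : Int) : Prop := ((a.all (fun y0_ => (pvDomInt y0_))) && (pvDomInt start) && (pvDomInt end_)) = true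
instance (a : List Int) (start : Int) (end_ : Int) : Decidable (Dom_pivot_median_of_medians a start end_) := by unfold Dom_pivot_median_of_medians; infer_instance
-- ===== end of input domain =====

-- B replaces A's three sorts by a quickselect-style nth_smallest (selection) and list.index; return values proved equal on Pre_.

-- ===== PORT A =====
-- the chunk key c[len(c)//2] (A's sort key and its final median access); Python raises on an empty c (excluded by Pre_)
def pvKeyA (c : List Int) : Int :=
  PySem.List.pyGetD c (PySem.Int.floordiv (c.length : Int) 2) 0

def pivot_median_of_medians (a : List Int) (start : Int) (end_ : Int) : Int :=
  if end_ - start + 1 < 50 then end_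
  else
    let chunks := (PySem.List.pyRange start (end_ + 1) 50).map
      (fun i => PySem.List.slice a (some i) (some (min (end_ + 1) (i + 50))))
    let chunks := chunks.map (fun c => PySem.List.sorted c (fun x => x) false)
    let chunks := PySem.List.sorted chunks pvKeyA false
    let middle_chunk := PySem.List.pyGetD chunks (PySem.Int.floordiv (chunks.length : Int) 2) []
    let pivot_val := pvKeyA middle_chunk
    -- final loop: first i in range(start, end+1) with a[i] == pivot_val; Python raises IndexError at an
    -- out-of-range a[i] and returns None when the loop falls through — both unreachable inside Pre_ ('none => 0')
    match (PySem.List.pyRange start (end_ + 1) 1).find?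
        (fun i => PySem.List.pyGet? a i == some pivot_val) with
    | some i => i
    | none => 0

-- ===== PORT B =====
-- k-th smallest (0-based) element of xs, 0 ≤ k < len xs; Python's xs[0] raises on empty xs (never reached: '[] => 0')
def pvNth (xs : List Int) (k : Int) : Int :=
  match xs with
  | [] => 0
  | p :: rest =>
    let lt := (p :: rest).filter (fun x => decide (x < p))
    if k < (lt.length : Int) then pvNth lt k
    else
      let eq := PySem.List.count (p :: rest) p
      if k < (lt.length : Int) + (eq : Int) then p
      else pvNth ((p :: rest).filter (fun x => decide (p < x))) (k - (lt.length : Int) - (eq : Int))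
  termination_by xs.length
  decreasing_by
  · simp only [List.filter_cons, decide_eq_true_eq, lt_self_iff_false, if_false, List.length_cons]
    exact Nat.lt_succ_of_le (List.length_filter_le _ _)
  · simp only [List.filter_cons, decide_eq_true_eq, lt_self_iff_false, if_false, List.length_cons]
    exact Nat.lt_succ_of_le (List.length_filter_le _ _)

def pvChunkMedian (a : List Int) (i : Int) (hi : Int) : Int :=
  let c := PySem.List.slice a (some i) (some hi)
  pvNth c (PySem.Int.floordiv (c.length : Int) 2)

-- list.index(v, i, stop): exact for 0 ≤ i when v occurs in a[i:stop]; Python raises ValueError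
-- when v is absent there — unreachable inside Pre_ ('none => 0')
def pvIndexFrom (a : List Int) (v : Int) (i : Int) (stop : Int) : Int :=
  match PySem.List.index? (PySem.List.slice a (some i) (some stop)) v with
  | some k => i + (k : Int)
  | none => 0

def pivot_median_of_medians_alt (a : List Int) (start : Int) (end_ : Int) : Int :=
  if end_ - start + 1 < 50 then end_
  else
    let medians := (PySem.List.pyRange start (end_ + 1) 50).map
      (fun i => pvChunkMedian a i (min (end_ + 1) (i + 50)))
    let pivot_val := pvNth medians (PySem.Int.floordiv (medians.length : Int) 2)
    pvIndexFrom a pivot_val start (end_ + 1)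

-- ===== PRECONDITION & SPEC =====
-- Pre_ restricts the ≥50-span case to the function's natural domain of valid subarray bounds
-- 0 ≤ start ≤ end < len(a); outside it Python slicing/negative indexing makes A raise IndexError on
-- most inputs, and where A still returns, the value is an accident of slice clamping past the end.
-- Spans < 50 are always admitted (A returns end unconditionally there).
def Pre_pivot_median_of_medians (a : List Int) (start : Int) (end_ : Int) : Prop :=
  end_ - start + 1 < 50 ∨ (0 ≤ start ∧ start ≤ end_ ∧ end_ < (a.length : Int))
instance (a : List Int) (start : Int) (end_ : Int) : Decidable (Pre_pivot_median_of_medians a start end_) := by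
  unfold Pre_pivot_median_of_medians; infer_instance

def pvWitness_pivot_median_of_medians : List Int × Int × Int := ([1, 2, 3], 0, 2)

def Spec_pivot_median_of_medians (a : List Int) (start : Int) (end_ : Int) (out : Int) : Prop := out = pivot_median_of_medians_alt a start end_
instance (a : List Int) (start : Int) (end_ : Int) (out : Int) : Decidable (Spec_pivot_median_of_medians a start end_ out) := by unfold Spec_pivot_median_of_medians; infer_instance

-- ===== CLAIM (what is proved, stated in full; the proofs are below) =====
def Claim_equal_pivot_median_of_medians : Prop := ∀ (a : List Int) (start : Int) (end_ : Int), Dom_pivot_median_of_medians a start end_ → Pre_pivot_median_of_medians a start end_ → Spec_pivot_median_of_medians a start end_ (pivot_median_of_medians a start end_)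

-- ===== LEMMAS AND PROOFS =====

theorem pv_countP_split (l : List Int) (q r : Int → Bool) :
    l.countP q = l.countP (fun x => q x && r x) + l.countP (fun x => q x && !r x) := by
  rw [← List.countP_filter, ← List.countP_filter, ← List.countP_append]
  exact ((List.filter_append_perm r l).countP_eq q).symm

theorem pv_length_three_way (xs : List Int) (p : Int) :
    xs.length = (xs.filter (fun x => decide (x < p))).length + PySem.List.count xs p
      + (xs.filter (fun x => decide (p < x))).length := by
  have h1 := pv_countP_split xs (fun _ => true) (fun x => decide (x < p))
  have h2 := pv_countP_split xs (fun x => true && !decide (x < p)) (fun x => x == p)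
  simp only [Bool.true_and] at h1 h2
  have h0 : List.countP (fun _ => true) xs = xs.length := congrFun List.countP_true xs
  have e1 : xs.countP (fun x => !decide (x < p) && (x == p)) = PySem.List.count xs p := by
    rw [PySem.List.count_eq, List.count_eq_countP]
    apply List.countP_congr; intro x _; simp; omega
  have e2 : xs.countP (fun x => !decide (x < p) && !(x == p)) = (xs.filter (fun x => decide (p < x))).length := by
    rw [← List.countP_eq_length_filter]
    apply List.countP_congr; intro x _; simp; omega
  have e3 : xs.countP (fun x => decide (x < p)) = (xs.filter (fun x => decide (x < p))).length :=
    List.countP_eq_length_filter ..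
  rw [← h0, h1, h2, e1, e2, e3]; omega

theorem pvNth_mem (xs : List Int) (k : Int) (h0 : 0 ≤ k) (hk : k < (xs.length : Int)) :
    pvNth xs k ∈ xs := by
  match xs with
  | [] => simp at hk; omega
  | p :: rest =>
    rw [pvNth]
    simp only
    split
    · rename_i h
      have hlen : ((p :: rest).filter (fun x => decide (x < p))).length ≤ rest.length := by
        simp only [List.filter_cons, decide_eq_true_eq, lt_self_iff_false, if_false]
        exact List.length_filter_le _ _
      exact List.mem_of_mem_filter (pvNth_mem _ k h0 (by omega))
    · split
      · exact List.mem_cons_self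
      · rename_i h1 h2
        have h3 := pv_length_three_way (p :: rest) p
        have hlen : ((p :: rest).filter (fun x => decide (p < x))).length ≤ rest.length := by
          simp only [List.filter_cons, decide_eq_true_eq, lt_self_iff_false, if_false]
          exact List.length_filter_le _ _
        apply List.mem_of_mem_filter (pvNth_mem _ _ (by omega) (by omega))
  termination_by xs.length
  decreasing_by
  · simp only [List.filter_cons, decide_eq_true_eq, lt_self_iff_false, if_false, List.length_cons]
    exact Nat.lt_succ_of_le (List.length_filter_le _ _)
  · simp only [List.filter_cons, decide_eq_true_eq, lt_self_iff_false, if_false, List.length_cons]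
    exact Nat.lt_succ_of_le (List.length_filter_le _ _)

-- counts of (< v) / (≤ v) pass to the lower filter when v < p
theorem pv_count_lt_left (xs : List Int) (p v : Int) (hvp : v < p) :
    xs.countP (fun x => decide (x < v))
      = (xs.filter (fun x => decide (x < p))).countP (fun x => decide (x < v)) := by
  rw [List.countP_filter]
  apply List.countP_congr; intro x _; simp; omega

theorem pv_count_le_left (xs : List Int) (p v : Int) (hvp : v < p) :
    xs.countP (fun x => decide (x ≤ v))
      = (xs.filter (fun x => decide (x < p))).countP (fun x => decide (x ≤ v)) := by
  rw [List.countP_filter]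
  apply List.countP_congr; intro x _; simp; omega

-- counts of (< v) / (≤ v) decompose through the pivot when p < v
theorem pv_count_lt_right (xs : List Int) (p v : Int) (hpv : p < v) :
    xs.countP (fun x => decide (x < v))
      = (xs.filter (fun x => decide (x < p))).length + PySem.List.count xs p
        + (xs.filter (fun x => decide (p < x))).countP (fun x => decide (x < v)) := by
  have h1 := pv_countP_split xs (fun x => decide (x < v)) (fun x => decide (x < p))
  have h2 := pv_countP_split xs (fun x => decide (x < v) && !decide (x < p)) (fun x => x == p)
  have e0 : xs.countP (fun x => decide (x < v) && decide (x < p))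
      = (xs.filter (fun x => decide (x < p))).length := by
    rw [← List.countP_eq_length_filter]
    apply List.countP_congr; intro x _; simp; omega
  have e1 : xs.countP (fun x => decide (x < v) && !decide (x < p) && (x == p))
      = PySem.List.count xs p := by
    rw [PySem.List.count_eq, List.count_eq_countP]
    apply List.countP_congr; intro x _; simp; omega
  have e2 : xs.countP (fun x => decide (x < v) && !decide (x < p) && !(x == p))
      = (xs.filter (fun x => decide (p < x))).countP (fun x => decide (x < v)) := by
    rw [List.countP_filter]
    apply List.countP_congr; intro x _; simp; omega
  omega

theorem pv_count_le_right (xs : List Int) (p v : Int) (hpv : p < v) :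
    xs.countP (fun x => decide (x ≤ v))
      = (xs.filter (fun x => decide (x < p))).length + PySem.List.count xs p
        + (xs.filter (fun x => decide (p < x))).countP (fun x => decide (x ≤ v)) := by
  have h1 := pv_countP_split xs (fun x => decide (x ≤ v)) (fun x => decide (x < p))
  have h2 := pv_countP_split xs (fun x => decide (x ≤ v) && !decide (x < p)) (fun x => x == p)
  have e0 : xs.countP (fun x => decide (x ≤ v) && decide (x < p))
      = (xs.filter (fun x => decide (x < p))).length := by
    rw [← List.countP_eq_length_filter]
    apply List.countP_congr; intro x _; simp; omega
  have e1 : xs.countP (fun x => decide (x ≤ v) && !decide (x < p) && (x == p))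
      = PySem.List.count xs p := by
    rw [PySem.List.count_eq, List.count_eq_countP]
    apply List.countP_congr; intro x _; simp; omega
  have e2 : xs.countP (fun x => decide (x ≤ v) && !decide (x < p) && !(x == p))
      = (xs.filter (fun x => decide (p < x))).countP (fun x => decide (x ≤ v)) := by
    rw [List.countP_filter]
    apply List.countP_congr; intro x _; simp; omega
  omega

-- counts at the pivot itself
theorem pv_count_lt_pivot (xs : List Int) (p : Int) :
    xs.countP (fun x => decide (x < p)) = (xs.filter (fun x => decide (x < p))).length :=
  List.countP_eq_length_filter ..

theorem pv_count_le_pivot (xs : List Int) (p : Int) :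
    xs.countP (fun x => decide (x ≤ p))
      = (xs.filter (fun x => decide (x < p))).length + PySem.List.count xs p := by
  have h1 := pv_countP_split xs (fun x => decide (x ≤ p)) (fun x => decide (x < p))
  have e0 : xs.countP (fun x => decide (x ≤ p) && decide (x < p))
      = (xs.filter (fun x => decide (x < p))).length := by
    rw [← List.countP_eq_length_filter]
    apply List.countP_congr; intro x _; simp; omega
  have e1 : xs.countP (fun x => decide (x ≤ p) && !decide (x < p)) = PySem.List.count xs p := by
    rw [PySem.List.count_eq, List.count_eq_countP]
    apply List.countP_congr; intro x _; simp; omega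
  omega

theorem pvNth_count_bounds (xs : List Int) (k : Int) (h0 : 0 ≤ k)
    (hk : k < (xs.length : Int)) :
    xs.countP (fun x => decide (x < pvNth xs k)) ≤ k.toNat ∧
      k.toNat < xs.countP (fun x => decide (x ≤ pvNth xs k)) := by
  match xs with
  | [] => simp at hk; omega
  | p :: rest =>
    rw [pvNth]
    simp only
    split
    · rename_i h
      have hsub : ((p :: rest).filter (fun x => decide (x < p))).length ≤ rest.length := by
        simp only [List.filter_cons, decide_eq_true_eq, lt_self_iff_false, if_false]
        exact List.length_filter_le _ _
      have hmem := pvNth_mem ((p :: rest).filter (fun x => decide (x < p))) k h0 (by omega)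
      have hvp : pvNth ((p :: rest).filter (fun x => decide (x < p))) k < p := by
        have := (List.mem_filter.mp hmem).2; simpa using this
      have IH := pvNth_count_bounds ((p :: rest).filter (fun x => decide (x < p))) k h0 (by omega)
      rw [pv_count_lt_left (p :: rest) p _ hvp, pv_count_le_left (p :: rest) p _ hvp]
      exact IH
    · split
      · rename_i h1 h2
        rw [pv_count_lt_pivot, pv_count_le_pivot]
        omega
      · rename_i h1 h2
        have h3 := pv_length_three_way (p :: rest) p
        have hsub : ((p :: rest).filter (fun x => decide (p < x))).length ≤ rest.length := by
          simp only [List.filter_cons, decide_eq_true_eq, lt_self_iff_false, if_false]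
          exact List.length_filter_le _ _
        have hklt : k - ((p :: rest).filter (fun x => decide (x < p))).length
            - (PySem.List.count (p :: rest) p : Int)
            < (((p :: rest).filter (fun x => decide (p < x))).length : Int) := by
          simp only [List.length_cons] at hk h3; omega
        have hmem := pvNth_mem ((p :: rest).filter (fun x => decide (p < x))) _ (by omega) hklt
        have hvp : p < pvNth ((p :: rest).filter (fun x => decide (p < x)))
            (k - ((p :: rest).filter (fun x => decide (x < p))).length
              - (PySem.List.count (p :: rest) p : Int)) := by
          have := (List.mem_filter.mp hmem).2; simpa using this
        have IH := pvNth_count_bounds ((p :: rest).filter (fun x => decide (p < x))) _ (by omega) hklt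
        rw [pv_count_lt_right (p :: rest) p _ hvp, pv_count_le_right (p :: rest) p _ hvp]
        omega
  termination_by xs.length
  decreasing_by
  · simp only [List.filter_cons, decide_eq_true_eq, lt_self_iff_false, if_false, List.length_cons]
    exact Nat.lt_succ_of_le (List.length_filter_le _ _)
  · simp only [List.filter_cons, decide_eq_true_eq, lt_self_iff_false, if_false, List.length_cons]
    exact Nat.lt_succ_of_le (List.length_filter_le _ _)

theorem pv_count_bounds_of_sorted (xs s : List Int) (hp : s.Perm xs)
    (hs : s.Pairwise (· ≤ ·)) (k : Nat) (hk : k < s.length) :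
    xs.countP (fun x => decide (x < s[k])) ≤ k ∧
      k < xs.countP (fun x => decide (x ≤ s[k])) := by
  rw [← hp.countP_eq, ← hp.countP_eq]
  have hpg := List.pairwise_iff_getElem.mp hs
  constructor
  · calc s.countP (fun x => decide (x < s[k]))
        = (s.take k).countP (fun x => decide (x < s[k]))
            + (s.drop k).countP (fun x => decide (x < s[k])) := by
          rw [← List.countP_append, List.take_append_drop]
      _ ≤ k + 0 := by
          apply Nat.add_le_add
          · exact le_trans List.countP_le_length (by simp [List.length_take])
          · apply Nat.le_of_eq
            rw [List.countP_eq_zero]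
            intro a ha
            rw [List.mem_drop_iff_getElem] at ha
            obtain ⟨i, hi, rfl⟩ := ha
            simp only [decide_eq_true_eq, not_lt]
            rcases Nat.eq_zero_or_pos i with h | h
            · subst h; simp
            · exact hpg k (k+i) hk (by omega) (by omega)
      _ = k := by omega
  · calc k < (s.take (k+1)).length := by simp [List.length_take]; omega
      _ = (s.take (k+1)).countP (fun x => decide (x ≤ s[k])) := by
          symm; rw [List.countP_eq_length]
          intro a ha
          rw [List.mem_take_iff_getElem] at ha
          obtain ⟨i, hi, rfl⟩ := ha
          simp only [decide_eq_true_eq]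
          rcases Nat.lt_or_ge i k with h | h
          · exact hpg i k (by omega) hk h
          · have : i = k := by omega
            subst this; exact le_refl _
      _ ≤ s.countP (fun x => decide (x ≤ s[k])) := (List.take_sublist _ _).countP_le

theorem pv_count_bounds_unique (xs : List Int) (k : Nat) (v w : Int)
    (hv1 : xs.countP (fun x => decide (x < v)) ≤ k)
    (hv2 : k < xs.countP (fun x => decide (x ≤ v)))
    (hw1 : xs.countP (fun x => decide (x < w)) ≤ k)
    (hw2 : k < xs.countP (fun x => decide (x ≤ w))) : v = w := by
  by_contra hne
  rcases lt_or_gt_of_ne hne with h | h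
  · have : xs.countP (fun x => decide (x ≤ v)) ≤ xs.countP (fun x => decide (x < w)) := by
      apply List.countP_mono_left
      intro x _ hx
      simp only [decide_eq_true_eq] at *
      omega
    omega
  · have : xs.countP (fun x => decide (x ≤ w)) ≤ xs.countP (fun x => decide (x < v)) := by
      apply List.countP_mono_left
      intro x _ hx
      simp only [decide_eq_true_eq] at *
      omega
    omega

theorem pvNth_eq_getElem_sorted (xs : List Int) (k : Int) (h0 : 0 ≤ k)
    (hk : k < (xs.length : Int)) :
    pvNth xs k = (PySem.List.sorted xs (fun x => x) false)[k.toNat]'(by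
      rw [PySem.List.length_sorted]; omega) := by
  have hlen : (PySem.List.sorted xs (fun x => x) false).length = xs.length :=
    PySem.List.length_sorted ..
  have hb1 := pv_count_bounds_of_sorted xs (PySem.List.sorted xs (fun x => x) false)
    (PySem.List.sorted_perm ..) (PySem.List.sorted_pairwise xs (fun x => x)) k.toNat (by omega)
  have hb2 := pvNth_count_bounds xs k h0 hk
  exact pv_count_bounds_unique xs k.toNat _ _ hb2.1 hb2.2 hb1.1 hb1.2

theorem pv_scan_eq_index (a : List Int) (v : Int) :
    ∀ (n : Nat) (i stop : Int), (stop - i).toNat = n → 0 ≤ i → i ≤ stop →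
      stop ≤ (a.length : Int) →
      (PySem.List.pyRange i stop 1).find? (fun j => PySem.List.pyGet? a j == some v)
        = Option.map (fun k : Nat => i + (k : Int))
            (PySem.List.index? (PySem.List.slice a (some i) (some stop)) v) := by
  intro n
  induction n with
  | zero =>
    intro i stop hn h0 h1 h2
    have : stop = i := by omega
    subst this
    rw [PySem.List.pyRange_one_eq_nil le_rfl,
      PySem.List.slice_of_nonneg a h0 h0 (by omega) (by omega)]
    simp
  | succ n ih =>
    intro i stop hn h0 h1 h2
    have hlt : i < stop := by omega
    have hil : i < (a.length : Int) := by omega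
    rw [PySem.List.pyRange_one_cons hlt]
    have hslice : PySem.List.slice a (some i) (some stop)
        = a[i.toNat]'(by omega) :: PySem.List.slice a (some (i+1)) (some stop) := by
      rw [PySem.List.slice_of_nonneg a h0 (by omega) (by omega) h2,
        PySem.List.slice_of_nonneg a (by omega) (by omega) (by omega) h2,
        List.drop_eq_getElem_cons (by omega)]
      have e1 : (i+1).toNat = i.toNat + 1 := by omega
      have e2 : stop.toNat - i.toNat = (stop.toNat - (i.toNat + 1)) + 1 := by omega
      rw [e1, e2, List.take_succ_cons]
    rw [hslice]
    have hget : PySem.List.pyGet? a i = some (a[i.toNat]'(by omega)) :=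
      PySem.List.pyGet?_eq_some_getElem a h0 hil
    by_cases hx : a[i.toNat]'(by omega) = v
    · rw [List.find?_cons_of_pos (by simp [hget, hx]), hx, PySem.List.index?_cons_self]
      simp
    · rw [List.find?_cons_of_neg (by simp [hget, hx]), PySem.List.index?_cons_of_ne _ hx,
        ih (i+1) stop (by omega) (by omega) (by omega) h2, Option.map_map]
      congr 1
      funext m
      simp only [Function.comp_apply]
      push_cast
      ring

-- the keys of a key-sorted list are the sorted keys
theorem pv_map_key_sorted (L : List (List Int)) :
    (PySem.List.sorted L pvKeyA false).map pvKeyA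
      = PySem.List.sorted (L.map pvKeyA) (fun x => x) false := by
  exact (PySem.List.sorted_id_eq_of_perm_of_pairwise _ _
    ((PySem.List.sorted_perm L pvKeyA false).map pvKeyA)
    (PySem.List.sorted_map_key_pairwise L pvKeyA)).symm



-- pvKeyA on a non-empty list is its middle element
theorem pv_keyA_eq_getElem (s : List Int) (hs : 0 < s.length) :
    pvKeyA s = s[s.length / 2]'(Nat.div_lt_self hs one_lt_two) := by
  rw [pvKeyA]
  have hfd : PySem.Int.floordiv ((s.length : Int)) 2 = ((s.length / 2 : Nat) : Int) := by
    exact_mod_cast PySem.Int.floordiv_natCast s.length 2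
  rw [hfd, PySem.List.pyGetD_natCast, List.getD_eq_getElem]

-- per-chunk: the middle of the sorted chunk is the quickselected median
theorem pv_median_eq (c : List Int) (hc : 0 < c.length) :
    pvKeyA (PySem.List.sorted c (fun x => x) false)
      = pvNth c (PySem.Int.floordiv ((c.length : Int)) 2) := by
  have hlt : c.length / 2 < c.length := Nat.div_lt_self hc one_lt_two
  have hfd : PySem.Int.floordiv ((c.length : Int)) 2 = ((c.length / 2 : Nat) : Int) := by
    exact_mod_cast PySem.Int.floordiv_natCast c.length 2
  rw [hfd, pvNth_eq_getElem_sorted c _ (by positivity) (by exact_mod_cast hlt),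
    pv_keyA_eq_getElem _ (by rw [PySem.List.length_sorted]; omega)]
  have hsl : (PySem.List.sorted c (fun x => x) false).length = c.length :=
    PySem.List.length_sorted ..
  congr 1
  omega

-- the pivot A extracts from the key-sorted chunk list is the quickselected median of the key list
theorem pv_pivot_eq (L : List (List Int)) (hL : 0 < L.length) :
    pvKeyA (PySem.List.pyGetD (PySem.List.sorted L pvKeyA false)
        (PySem.Int.floordiv (((PySem.List.sorted L pvKeyA false).length : Int)) 2) [])
      = pvNth (L.map pvKeyA)
          (PySem.Int.floordiv (((L.map pvKeyA).length : Int)) 2) := by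
  have hsl : (PySem.List.sorted L pvKeyA false).length = L.length := PySem.List.length_sorted ..
  have hml : (L.map pvKeyA).length = L.length := List.length_map ..
  have hlt : L.length / 2 < L.length := Nat.div_lt_self hL one_lt_two
  have hfd : PySem.Int.floordiv (((PySem.List.sorted L pvKeyA false).length : Int)) 2
      = (((PySem.List.sorted L pvKeyA false).length / 2 : Nat) : Int) := by
    exact_mod_cast PySem.Int.floordiv_natCast _ 2
  have hfd2 : PySem.Int.floordiv (((L.map pvKeyA).length : Int)) 2
      = (((L.map pvKeyA).length / 2 : Nat) : Int) := by
    exact_mod_cast PySem.Int.floordiv_natCast _ 2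
  rw [hfd, hfd2, PySem.List.pyGetD_natCast,
    List.getD_eq_getElem _ _ (by omega),
    pvNth_eq_getElem_sorted _ _ (by positivity) (by exact_mod_cast Nat.div_lt_self (by omega) one_lt_two)]
  have h1 : pvKeyA ((PySem.List.sorted L pvKeyA false)[(PySem.List.sorted L pvKeyA false).length / 2]'(by omega))
      = ((PySem.List.sorted L pvKeyA false).map pvKeyA)[(PySem.List.sorted L pvKeyA false).length / 2]'(by
          rw [List.length_map]; omega) := (List.getElem_map _).symm
  rw [h1]
  have h2 := pv_map_key_sorted L
  simp only [h2]
  congr 1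
  omega

-- an inner slice is a sublist of the enclosing slice
theorem pv_slice_subset (a : List Int) (s i hi e : Int) (h0 : 0 ≤ s) (h1 : s ≤ i)
    (h2 : i ≤ hi) (h3 : hi ≤ e) (h4 : e ≤ (a.length : Int)) :
    PySem.List.slice a (some i) (some hi) ⊆ PySem.List.slice a (some s) (some e) := by
  rw [PySem.List.slice_of_nonneg a (by omega) (by omega) (by omega) (by omega),
    PySem.List.slice_of_nonneg a h0 (by omega) (by omega) (by omega)]
  have key : List.take (hi.toNat - i.toNat) (List.drop i.toNat a)
      = List.take (hi.toNat - i.toNat)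
          (List.drop (i.toNat - s.toNat) (List.take (e.toNat - s.toNat) (List.drop s.toNat a))) := by
    rw [List.drop_take, List.drop_drop, List.take_take]
    rw [min_eq_left (by omega)]
    congr 2
    omega
  rw [key]
  intro x hx
  exact List.drop_subset _ _ (List.take_subset _ _ hx)


-- the two ports agree on the large-span case
theorem pv_main (a : List Int) (start end_ : Int) (hs : 0 ≤ start) (_hse : start ≤ end_)
    (hel : end_ < (a.length : Int)) (hbig : ¬ (end_ - start + 1 < 50)) :
    pivot_median_of_medians a start end_ = pivot_median_of_medians_alt a start end_ := by
  simp only [pivot_median_of_medians, pivot_median_of_medians_alt, if_neg hbig]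
  have hmemR : ∀ i ∈ PySem.List.pyRange start (end_ + 1) 50, start ≤ i ∧ i < end_ + 1 := by
    intro i hi
    have := (PySem.List.mem_pyRange_iff_of_pos (by norm_num) i).mp hi
    exact ⟨this.1, this.2.1⟩
  have hchunklen : ∀ i, start ≤ i → i < end_ + 1 →
      0 < (PySem.List.slice a (some i) (some (min (end_ + 1) (i + 50)))).length := by
    intro i h1 h2
    rw [PySem.List.slice_of_nonneg a (by omega) (by omega) (by omega) (by omega),
      List.length_take, List.length_drop]
    omega
  have hmed : (PySem.List.pyRange start (end_ + 1) 50).map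
        (fun i => pvChunkMedian a i (min (end_ + 1) (i + 50)))
      = (((PySem.List.pyRange start (end_ + 1) 50).map
          (fun i => PySem.List.slice a (some i) (some (min (end_ + 1) (i + 50))))).map
          (fun c => PySem.List.sorted c (fun x => x) false)).map pvKeyA := by
    rw [List.map_map, List.map_map]
    apply List.map_congr_left
    intro i hiR
    obtain ⟨h1, h2⟩ := hmemR i hiR
    simp only [Function.comp, pvChunkMedian]
    exact (pv_median_eq _ (hchunklen i h1 h2)).symm
  have hRne : 0 < (PySem.List.pyRange start (end_ + 1) 50).length := by
    have hm : start ∈ PySem.List.pyRange start (end_ + 1) 50 :=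
      (PySem.List.mem_pyRange_iff_of_pos (by norm_num) start).mpr
        ⟨le_rfl, by omega, ⟨0, by ring⟩⟩
    exact List.length_pos_iff.mpr (List.ne_nil_of_mem hm)
  have hLlen : 0 < (((PySem.List.pyRange start (end_ + 1) 50).map
      (fun i => PySem.List.slice a (some i) (some (min (end_ + 1) (i + 50))))).map
      (fun c => PySem.List.sorted c (fun x => x) false)).length := by
    simpa using hRne
  have hpiv := pv_pivot_eq (((PySem.List.pyRange start (end_ + 1) 50).map
      (fun i => PySem.List.slice a (some i) (some (min (end_ + 1) (i + 50))))).map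
      (fun c => PySem.List.sorted c (fun x => x) false)) hLlen
  rw [← hmed] at hpiv
  rw [hpiv]
  -- the pivot value lies in the scanned subarray
  have hmlen : ((PySem.List.pyRange start (end_ + 1) 50).map
      (fun i => pvChunkMedian a i (min (end_ + 1) (i + 50)))).length
      = (PySem.List.pyRange start (end_ + 1) 50).length := List.length_map ..
  have hfdm : PySem.Int.floordiv ((((PySem.List.pyRange start (end_ + 1) 50).map
        (fun i => pvChunkMedian a i (min (end_ + 1) (i + 50)))).length : Int)) 2
      = ((((PySem.List.pyRange start (end_ + 1) 50).map
        (fun i => pvChunkMedian a i (min (end_ + 1) (i + 50)))).length / 2 : Nat) : Int) := by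
    exact_mod_cast PySem.Int.floordiv_natCast _ 2
  have hvmemM : pvNth ((PySem.List.pyRange start (end_ + 1) 50).map
        (fun i => pvChunkMedian a i (min (end_ + 1) (i + 50))))
        (PySem.Int.floordiv ((((PySem.List.pyRange start (end_ + 1) 50).map
          (fun i => pvChunkMedian a i (min (end_ + 1) (i + 50)))).length : Int)) 2)
      ∈ (PySem.List.pyRange start (end_ + 1) 50).map
        (fun i => pvChunkMedian a i (min (end_ + 1) (i + 50))) := by
    apply pvNth_mem
    · rw [hfdm]; positivity
    · rw [hfdm, hmlen]
      have : (PySem.List.pyRange start (end_ + 1) 50).length / 2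
          < (PySem.List.pyRange start (end_ + 1) 50).length := Nat.div_lt_self hRne one_lt_two
      exact_mod_cast this
  have hvmem : pvNth ((PySem.List.pyRange start (end_ + 1) 50).map
        (fun i => pvChunkMedian a i (min (end_ + 1) (i + 50))))
        (PySem.Int.floordiv ((((PySem.List.pyRange start (end_ + 1) 50).map
          (fun i => pvChunkMedian a i (min (end_ + 1) (i + 50)))).length : Int)) 2)
      ∈ PySem.List.slice a (some start) (some (end_ + 1)) := by
    obtain ⟨i, hiR, hveq⟩ := List.mem_map.mp hvmemM
    obtain ⟨h1, h2⟩ := hmemR i hiR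
    have hclen := hchunklen i h1 h2
    have hfdc : PySem.Int.floordiv (((PySem.List.slice a (some i)
          (some (min (end_ + 1) (i + 50)))).length : Int)) 2
        = (((PySem.List.slice a (some i) (some (min (end_ + 1) (i + 50)))).length / 2 : Nat) : Int) := by
      exact_mod_cast PySem.Int.floordiv_natCast _ 2
    have hvc : pvChunkMedian a i (min (end_ + 1) (i + 50))
        ∈ PySem.List.slice a (some i) (some (min (end_ + 1) (i + 50))) := by
      rw [pvChunkMedian]
      apply pvNth_mem
      · rw [hfdc]; positivity
      · rw [hfdc]
        exact_mod_cast Nat.div_lt_self hclen one_lt_two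
    rw [← hveq]
    exact pv_slice_subset a start i (min (end_ + 1) (i + 50)) (end_ + 1)
      hs h1 (by omega) (by omega) (by omega) hvc
  obtain ⟨k, hk⟩ := Option.isSome_iff_exists.mp
    ((PySem.List.index?_isSome_iff _ _).mpr hvmem)
  rw [pv_scan_eq_index a _ (end_ + 1 - start).toNat start (end_ + 1) rfl hs (by omega) (by omega), hk]
  unfold pvIndexFrom
  rw [hk]
  rfl

-- ===== VERDICT (by name: the statement is the Claim_ definition above) =====
theorem pivot_median_of_medians_spec : Claim_equal_pivot_median_of_medians := by
  intro a start end_ _hdom hpre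
  unfold Spec_pivot_median_of_medians
  by_cases hsmall : end_ - start + 1 < 50
  · simp only [pivot_median_of_medians, pivot_median_of_medians_alt, if_pos hsmall]
  · rcases hpre with h | ⟨h1, h2, h3⟩
    · exact absurd h hsmall
    · exact pv_main a start end_ h1 h2 h3 hsmall
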